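-- pv_equiv track=rewrite | github.com/leon-venir/mkits | mkits/vasp.py | savevaspsh
-- ===== SOURCE A (Python) =====
-- def savevaspsh(savelist, savelabel):
--     """
--     Write a bash scripts to save the vasp files with provided labels.
--     Parameters:
--     -----------
--
--     Return:
--     -------
--     String
--     """
--
--     savelist2string = ""
--     breakline = 0
--     for i in savelist:
--         if breakline > 3:
--             savelist2string += " \\\n          "
--             breakline = 0
--         savelist2string += "'" + i + "' "
--         breakline += 1
--
--
--     savestring = '''  ffout=( %s )
--   for ifout in ${ffout[@]}; do
--     mv $ifout "$ifout"_%s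
--   done
--     ''' % (savelist2string, savelabel)
--
--     return savestring
-- ===== SOURCE B (Python) =====
-- def savevaspsh(savelist, savelabel):
--     """
--     Write a bash scripts to save the vasp files with provided labels.
--     Parameters:
--     -----------
--
--     Return:
--     -------
--     String
--     """
--
--     chunks = [savelist[j:j + 4] for j in range(0, len(savelist), 4)]
--
--     savelist2string = " \\\n          ".join(
--         "".join("'" + x + "' " for x in chunk) for chunk in chunks
--     )
--
--     savestring = '''  ffout=( %s )
--   for ifout in ${ffout[@]}; do
--     mv $ifout "$ifout"_%s
--   done
--     ''' % (savelist2string, savelabel)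
--
--     return savestring
-- ===== Notes on version B (the rewrite author's own statement) =====
-- stated objective: alternative
-- what changed: Replaces A's single accumulator loop with a breakline counter by a two-phase decomposition: recursively split savelist into chunks of 4, format each chunk, and join the chunk strings with the line-break separator.
import Mathlib
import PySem

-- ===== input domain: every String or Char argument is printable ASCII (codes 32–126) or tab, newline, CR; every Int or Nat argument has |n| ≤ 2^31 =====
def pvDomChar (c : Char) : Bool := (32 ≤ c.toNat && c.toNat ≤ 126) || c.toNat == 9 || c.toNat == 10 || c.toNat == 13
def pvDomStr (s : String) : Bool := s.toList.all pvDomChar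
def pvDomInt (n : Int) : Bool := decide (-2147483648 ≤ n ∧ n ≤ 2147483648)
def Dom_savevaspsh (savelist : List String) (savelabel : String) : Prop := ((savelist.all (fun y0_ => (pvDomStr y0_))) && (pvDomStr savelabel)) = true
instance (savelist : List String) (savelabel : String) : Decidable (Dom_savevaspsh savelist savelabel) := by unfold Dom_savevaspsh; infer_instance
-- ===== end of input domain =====

-- B replaces A's single accumulator loop with a breakline counter by a two-phase
-- group-into-chunks-of-4 (slice comprehension) then format-and-join decomposition (objective: alternative).

-- ===== PORT A =====
-- A's for-loop over savelist with state (savelist2string, breakline)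
def savevaspshLoop : List String → String → Nat → String
  | [], s, _ => s
  | i :: rest, s, breakline =>
    if breakline > 3 then
      savevaspshLoop rest ((s ++ " \\\n          ") ++ ("'" ++ i ++ "' ")) 1
    else
      savevaspshLoop rest (s ++ ("'" ++ i ++ "' ")) (breakline + 1)

def savevaspsh (savelist : List String) (savelabel : String) : String :=
  let savelist2string := savevaspshLoop savelist "" 0
  "  ffout=( " ++ savelist2string ++ " )\n  for ifout in ${ffout[@]}; do\n    mv $ifout \"$ifout\"_" ++ savelabel ++ "\n  done\n    "

-- ===== PORT B =====
-- "".join("'" + x + "' " for x in chunk)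
def savevaspshFmt : List String → String
  | [] => ""
  | x :: rest => ("'" ++ x ++ "' ") ++ savevaspshFmt rest

-- " \\\n          ".join(parts)
def savevaspshJoin : List String → String
  | [] => ""
  | [c] => c
  | c :: d :: rest => c ++ " \\\n          " ++ savevaspshJoin (d :: rest)

def savevaspsh_alt (savelist : List String) (savelabel : String) : String :=
  -- chunks = [savelist[j:j+4] for j in range(0, len(savelist), 4)]
  let chunks := (PySem.List.pyRange 0 (savelist.length : Int) 4).map
      (fun j => PySem.List.slice savelist (some j) (some (j + 4)))
  let savelist2string := savevaspshJoin (chunks.map savevaspshFmt)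
  "  ffout=( " ++ savelist2string ++ " )\n  for ifout in ${ffout[@]}; do\n    mv $ifout \"$ifout\"_" ++ savelabel ++ "\n  done\n    "

-- ===== PRECONDITION & SPEC =====
def Spec_savevaspsh (savelist : List String) (savelabel : String) (out : String) : Prop := out = savevaspsh_alt savelist savelabel
instance (savelist : List String) (savelabel : String) (out : String) : Decidable (Spec_savevaspsh savelist savelabel out) := by unfold Spec_savevaspsh; infer_instance

-- ===== CLAIM (what is proved, stated in full; the proofs are below) =====
def Claim_equal_savevaspsh : Prop := ∀ (savelist : List String) (savelabel : String), Dom_savevaspsh savelist savelabel → Spec_savevaspsh savelist savelabel (savevaspsh savelist savelabel)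

-- ===== LEMMAS AND PROOFS =====

-- proof-side recursive chunking, the common shape both ports are reduced to
def savevaspshGroups : List String → List (List String)
  | [] => []
  | x :: rest => ((x :: rest).take 4) :: savevaspshGroups ((x :: rest).drop 4)
  termination_by xs => xs.length
  decreasing_by simp

theorem savevaspshGroups_nil : savevaspshGroups [] = [] := by rw [savevaspshGroups]

theorem savevaspshGroups_cons (x : String) (rest : List String) :
    savevaspshGroups (x :: rest) = ((x :: rest).take 4) :: savevaspshGroups ((x :: rest).drop 4) := by
  rw [savevaspshGroups]

-- B's range-of-slices comprehension, in drop/take form, is the recursive chunking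
theorem range_chunks_eq : ∀ (n : Nat) (xs : List String), xs.length ≤ n →
    (List.range ((xs.length + 3) / 4)).map (fun k => (xs.drop (4 * k)).take 4) = savevaspshGroups xs
  | _, [], _ => by simp [savevaspshGroups_nil]
  | _, [a], _ => by simp [savevaspshGroups_cons, savevaspshGroups_nil]
  | _, [a, b], _ => by simp [savevaspshGroups_cons, savevaspshGroups_nil]
  | _, [a, b, c], _ => by simp [savevaspshGroups_cons, savevaspshGroups_nil]
  | _, [a, b, c, d], _ => by simp [savevaspshGroups_cons, savevaspshGroups_nil]
  | n + 1, a :: b :: c :: d :: e :: rest, h => by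
    have hlen : (e :: rest).length ≤ n := by simp at h ⊢; omega
    have hm : ((a :: b :: c :: d :: e :: rest).length + 3) / 4
        = ((e :: rest).length + 3) / 4 + 1 := by simp; omega
    rw [hm, List.range_succ_eq_map, List.map_cons, List.map_map]
    have htail : ∀ k ∈ List.range (((e :: rest).length + 3) / 4),
        ((fun k => ((a :: b :: c :: d :: e :: rest).drop (4 * k)).take 4) ∘ (· + 1)) k
          = (fun k => ((e :: rest).drop (4 * k)).take 4) k := by
      intro k _
      show ((a :: b :: c :: d :: e :: rest).drop (4 * (k + 1))).take 4 = _
      have h4 : 4 * (k + 1) = 4 * k + 4 := by ring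
      rw [h4, ← List.drop_drop]
      simp
    rw [List.map_congr_left htail, range_chunks_eq n (e :: rest) hlen,
      savevaspshGroups_cons a (b :: c :: d :: e :: rest)]
    simp

theorem chunks_eq (xs : List String) :
    (PySem.List.pyRange 0 (xs.length : Int) 4).map
        (fun j => PySem.List.slice xs (some j) (some (j + 4))) = savevaspshGroups xs := by
  rw [PySem.List.pyRange_of_pos 0 (xs.length : Int) (by norm_num), List.map_map]
  have hm : (if (0 : Int) < (xs.length : Int)
      then (((xs.length : Int) - 0 + 4 - 1) / 4).toNat else 0) = (xs.length + 3) / 4 := by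
    split <;> omega
  rw [hm]
  have hfun : ∀ k ∈ List.range ((xs.length + 3) / 4),
      ((fun j => PySem.List.slice xs (some j) (some (j + 4))) ∘ fun k : Nat => (0 : Int) + 4 * ↑k) k
        = (fun k => (xs.drop (4 * k)).take 4) k := by
    intro k _
    show PySem.List.slice xs (some ((0 : Int) + 4 * ↑k)) (some ((0 : Int) + 4 * ↑k + 4)) = _
    have h1 : (0 : Int) + 4 * (k : Int) = ((4 * k : Nat) : Int) := by push_cast; ring
    rw [h1, show (4 : Int) = ((4 : Nat) : Int) from by norm_num,
      PySem.List.slice_natCast_add xs (4 * k) 4]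
  rw [List.map_congr_left hfun]
  exact range_chunks_eq xs.length xs le_rfl

-- after a full chunk of 4 the counter is 4; the next step emits the separator and
-- restarts the chunk count — the same as prepending the separator and starting at 0
theorem savevaspshLoop_four (e : String) (rest : List String) (s : String) :
    savevaspshLoop (e :: rest) s 4 = savevaspshLoop (e :: rest) (s ++ " \\\n          ") 0 := by
  simp [savevaspshLoop]

-- A's loop started at counter 0 produces exactly B's chunked-and-joined string
theorem savevaspshLoop_eq_join : ∀ (n : Nat) (xs : List String) (acc : String),
    xs.length ≤ n →
    savevaspshLoop xs acc 0 = acc ++ savevaspshJoin ((savevaspshGroups xs).map savevaspshFmt)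
  | n, [], acc, _ => by
    simp [savevaspshLoop, savevaspshGroups_nil, savevaspshJoin]
  | n, [a], acc, _ => by
    simp [savevaspshLoop, savevaspshGroups_cons, savevaspshGroups_nil, savevaspshJoin, savevaspshFmt,
      String.append_assoc, String.append_empty]
  | n, [a, b], acc, _ => by
    simp [savevaspshLoop, savevaspshGroups_cons, savevaspshGroups_nil, savevaspshJoin, savevaspshFmt,
      String.append_assoc, String.append_empty]
  | n, [a, b, c], acc, _ => by
    simp [savevaspshLoop, savevaspshGroups_cons, savevaspshGroups_nil, savevaspshJoin, savevaspshFmt,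
      String.append_assoc, String.append_empty]
  | n, [a, b, c, d], acc, _ => by
    simp [savevaspshLoop, savevaspshGroups_cons, savevaspshGroups_nil, savevaspshJoin, savevaspshFmt,
      String.append_assoc, String.append_empty]
  | n + 1, a :: b :: c :: d :: e :: rest, acc, h => by
    have hlen : (e :: rest).length ≤ n := by simp at h ⊢; omega
    have step : savevaspshLoop (a :: b :: c :: d :: e :: rest) acc 0
        = savevaspshLoop (e :: rest) ((((acc ++ ("'" ++ a ++ "' ")) ++ ("'" ++ b ++ "' ")) ++ ("'" ++ c ++ "' ")) ++ ("'" ++ d ++ "' ")) 4 := by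
      simp [savevaspshLoop]
    rw [step, savevaspshLoop_four,
      savevaspshLoop_eq_join n (e :: rest) _ hlen]
    have hg : savevaspshGroups (a :: b :: c :: d :: e :: rest)
        = [a, b, c, d] :: savevaspshGroups (e :: rest) := by
      simp [savevaspshGroups_cons]
    have hg2 : ∃ y ys, savevaspshGroups (e :: rest) = y :: ys := by
      simp [savevaspshGroups_cons]
    obtain ⟨y, ys, hy⟩ := hg2
    rw [hg, hy]
    simp [savevaspshJoin, savevaspshFmt, String.append_assoc, String.append_empty]

-- ===== VERDICT (by name: the statement is the Claim_ definition above) =====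
theorem savevaspsh_spec : Claim_equal_savevaspsh := by
  intro savelist savelabel _
  unfold Spec_savevaspsh savevaspsh savevaspsh_alt
  rw [savevaspshLoop_eq_join savelist.length savelist "" le_rfl, chunks_eq]
  simp [String.empty_append]
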